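-- pv_equiv track=rewrite | github.com/JangUniverse/HS_PS | JangUniverse/CodeUp/2832.py | f
-- ===== SOURCE A (Python) =====
-- def f(m, cnt):
--     if cnt <= 0 and m > 0:
--         return 0
--     if m == 1:
--         return 1
--     elif m == 2:
--         if cnt == 1:
--             return 1
--         else:
--             return 2
--     else:
--         return f(m - 1, cnt - 1) + f(m - 2, cnt - 1)
-- ===== SOURCE B (Python) =====
-- def f(m, cnt):
--     # bottom-up DP over the budget: row[i] == f(i, c) for the current budget c
--     if 2 * cnt < m:
--         return 0                 # a base case (m'<=2) is unreachable before the budget runs out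
--     c0 = cnt if cnt < m else m   # comparisons saturate beyond m, so the budget can be clamped
--     row = [0] * (m + 1)          # row for budget <= 0: every f(i, c<=0) is 0
--     for c in range(1, c0 + 1):
--         row = [0, 1, 1 if c == 1 else 2] + [x + y for x, y in zip(row[1:], row[2:])]
--     return row[m]
-- ===== Notes on version B (the rewrite author's own statement) =====
-- stated objective: faster
-- what changed: Replaces the exponential double recursion by an iterative bottom-up DP that builds a row of values f(i,c) for increasing budget c, clamping the budget at m and returning 0 outright when m > 2*cnt; intended as faster (asymptotic), though a timing run could not confirm a ratio: A times out on the larger probe inputs where B still returns.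
import Mathlib
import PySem

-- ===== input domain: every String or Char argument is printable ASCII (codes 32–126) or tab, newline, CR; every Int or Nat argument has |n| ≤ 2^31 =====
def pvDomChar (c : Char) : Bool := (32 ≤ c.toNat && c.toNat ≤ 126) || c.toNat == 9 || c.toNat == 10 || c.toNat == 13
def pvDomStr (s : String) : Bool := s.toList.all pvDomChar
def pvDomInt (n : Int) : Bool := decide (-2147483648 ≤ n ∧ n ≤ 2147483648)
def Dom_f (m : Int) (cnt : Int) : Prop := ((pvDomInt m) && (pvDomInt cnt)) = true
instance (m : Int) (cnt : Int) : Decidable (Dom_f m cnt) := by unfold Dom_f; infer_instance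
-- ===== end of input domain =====

-- B replaces A's exponential double recursion by an iterative bottom-up DP row (objective: faster, intended asymptotic; a timing run could not confirm a ratio -- A times out on larger inputs where B returns).


-- ===== PORT A =====
def f (m : Int) (cnt : Int) : Int :=
  if cnt ≤ 0 ∧ 0 < m then 0
  else if m = 1 then 1
  else if m = 2 then (if cnt = 1 then 1 else 2)
  else if m ≤ 2 then 0  -- totality guard: here (m ≤ 0) Python recurses forever (RecursionError); excluded by Pre_f
  else f (m - 1) (cnt - 1) + f (m - 2) (cnt - 1)
termination_by m.toNat
decreasing_by all_goals omega

-- ===== PORT B =====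
-- step of B's loop: row = [0, 1, 1 if c == 1 else 2] + [x+y for x,y in zip(row[1:], row[2:])]
def fAltStep (row : List Int) (c : Int) : List Int :=
  0 :: 1 :: (if c = 1 then 1 else 2) ::
    List.zipWith (· + ·) (PySem.List.slice row (some 1) none) (PySem.List.slice row (some 2) none)

def f_alt (m : Int) (cnt : Int) : Int :=
  if 2 * cnt < m then 0  -- no base case is reachable before the budget runs out
  else
    -- c0 = cnt if cnt < m else m; row = [0]*(m+1) folded through the loop; return row[m]
    PySem.List.pyGetD
      ((PySem.List.pyRange 1 ((if cnt < m then cnt else m) + 1) 1).foldl fAltStep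
        (List.replicate (m + 1).toNat 0)) m 0  -- row[m]; in range for every m ≥ 1 (Pre_f)

-- ===== PRECONDITION & SPEC =====
-- Pre_f: A terminates exactly for m ≥ 1 (for m ≤ 0 the recursion never reaches a base case: RecursionError).
def Pre_f (m : Int) (cnt : Int) : Prop := 1 ≤ m
instance (m : Int) (cnt : Int) : Decidable (Pre_f m cnt) := by unfold Pre_f; infer_instance
def pvWitness_f : Int × Int := (3, 2)

def Spec_f (m : Int) (cnt : Int) (out : Int) : Prop := out = f_alt m cnt
instance (m : Int) (cnt : Int) (out : Int) : Decidable (Spec_f m cnt out) := by unfold Spec_f; infer_instance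

-- ===== CLAIM (what is proved, stated in full; the proofs are below) =====
def Claim_equal_f : Prop := ∀ (m : Int) (cnt : Int), Dom_f m cnt → Pre_f m cnt → Spec_f m cnt (f m cnt)

-- ===== LEMMAS AND PROOFS =====

-- f is 0 whenever the budget is exhausted
theorem f_of_nonpos (m cnt : Int) (hm : 1 ≤ m) (hc : cnt ≤ 0) : f m cnt = 0 := by
  have h0 : (0:Int) < m := by omega
  rw [f]; simp [hc, h0]

-- the budget saturates: beyond m the value of f no longer depends on cnt
theorem f_sat (m c c' : Int) (hm : 1 ≤ m) (hc : m ≤ c) (hc' : m ≤ c') : f m c = f m c' := by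
  by_cases h1 : m = 1
  · subst h1
    conv_lhs => rw [f]
    conv_rhs => rw [f]
    simp [show ¬(c ≤ 0) from by omega, show ¬(c' ≤ 0) from by omega]
  · by_cases h2 : m = 2
    · subst h2
      conv_lhs => rw [f]
      conv_rhs => rw [f]
      simp [show ¬(c ≤ 0) from by omega, show ¬(c' ≤ 0) from by omega,
            show c ≠ 1 from by omega, show c' ≠ 1 from by omega]
    · have h3 : 3 ≤ m := by omega
      conv_lhs => rw [f]
      conv_rhs => rw [f]
      simp only [show ¬(c ≤ 0 ∧ 0 < m) from by omega, show ¬(c' ≤ 0 ∧ 0 < m) from by omega,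
        h1, h2, show ¬(m ≤ 2) from by omega, if_false]
      rw [f_sat (m - 1) (c - 1) (c' - 1) (by omega) (by omega) (by omega),
          f_sat (m - 2) (c - 1) (c' - 1) (by omega) (by omega) (by omega)]
termination_by m.toNat
decreasing_by all_goals omega

-- below twice the budget no base case is reachable: f is 0
theorem f_zero_of_big (m cnt : Int) (hm : 1 ≤ m) (h : 2 * cnt < m) : f m cnt = 0 := by
  by_cases h1 : m = 1
  · subst h1; rw [f]; simp [show cnt ≤ 0 from by omega]
  · by_cases h2 : m = 2
    · subst h2; rw [f]; simp [show cnt ≤ 0 from by omega]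
    · rw [f]
      by_cases hc : cnt ≤ 0
      · simp [hc, show (0:Int) < m from by omega]
      · simp only [show ¬(cnt ≤ 0 ∧ 0 < m) from by omega, h1, h2,
          show ¬(m ≤ 2) from by omega, if_false]
        rw [f_zero_of_big (m - 1) (cnt - 1) (by omega) (by omega),
            f_zero_of_big (m - 2) (cnt - 1) (by omega) (by omega)]
        norm_num
termination_by m.toNat
decreasing_by all_goals omega

-- loop invariant: row lists f(i, c) at every index i ≥ 1 (and 0 at index 0)
def RowInv (c : Int) (row : List Int) : Prop :=
  ∀ i : Nat, (h : i < row.length) → row[i] = if i = 0 then 0 else f (i : Int) c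

theorem inv_init (c : Int) (n : Nat) (hc : c ≤ 0) : RowInv c (List.replicate n 0) := by
  intro i h
  rw [List.getElem_replicate]
  split
  · rfl
  · next hi =>
    exact (f_of_nonpos i c (by exact_mod_cast Nat.one_le_iff_ne_zero.mpr hi) hc).symm

theorem inv_step (c : Int) (row : List Int) (hc : 1 ≤ c) (h : RowInv (c - 1) row) :
    RowInv c (fAltStep row c) := by
  intro i hlen
  have e1 : PySem.List.slice row (some 1) none = row.drop 1 :=
    (PySem.List.slice_from_one row).trans List.drop_one.symm
  have e2 : PySem.List.slice row (some 2) none = row.drop 2 := by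
    rw [PySem.List.slice_from row (show (0:Int) ≤ 2 by norm_num)]; rfl
  match i with
  | 0 => rfl
  | 1 =>
    simp only [fAltStep, List.getElem_cons_succ, List.getElem_cons_zero]
    rw [f]
    simp [show ¬(c ≤ 0) from by omega]
  | 2 =>
    simp only [fAltStep, List.getElem_cons_succ, List.getElem_cons_zero]
    rw [f]
    simp [show ¬(c ≤ 0) from by omega]
  | (j + 3) =>
    have hlen' : j + 3 < (fAltStep row c).length := hlen
    simp only [fAltStep, e1, e2, List.length_cons, List.length_zipWith, List.length_drop] at hlen'
    simp only [fAltStep, e1, e2, List.getElem_cons_succ]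
    rw [List.getElem_zipWith, List.getElem_drop, List.getElem_drop]
    rw [h (1 + j) (by omega), h (2 + j) (by omega)]
    simp only [show ¬(1 + j = 0) from by omega, show ¬(2 + j = 0) from by omega,
      show ¬(j + 3 = 0) from by omega, if_false]
    rw [show ((j + 3 : Nat) : Int) = (j : Int) + 3 from by push_cast; ring]
    conv_rhs => rw [f]
    simp only [show ¬(c ≤ 0 ∧ (0:Int) < (j:Int) + 3) from by omega,
      show ((j:Int) + 3) ≠ 1 from by omega, show ((j:Int) + 3) ≠ 2 from by omega,
      show ¬((j:Int) + 3 ≤ 2) from by omega, if_false]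
    rw [show (j:Int) + 3 - 1 = ((2 + j : Nat) : Int) from by push_cast; ring,
        show (j:Int) + 3 - 2 = ((1 + j : Nat) : Int) from by push_cast; ring]
    exact add_comm _ _

theorem step_length (row : List Int) (c : Int) :
    row.length ≤ (fAltStep row c).length := by
  have e1 : PySem.List.slice row (some 1) none = row.drop 1 :=
    (PySem.List.slice_from_one row).trans List.drop_one.symm
  have e2 : PySem.List.slice row (some 2) none = row.drop 2 := by
    rw [PySem.List.slice_from row (show (0:Int) ≤ 2 by norm_num)]; rfl
  simp only [fAltStep, e1, e2, List.length_cons, List.length_zipWith, List.length_drop]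
  omega

theorem inv_fold (k : Nat) (c : Int) (row : List Int) (hc : 0 ≤ c) (h : RowInv c row) :
    RowInv (c + k) ((PySem.List.pyRange (c + 1) (c + 1 + k) 1).foldl fAltStep row) ∧
      row.length ≤ ((PySem.List.pyRange (c + 1) (c + 1 + k) 1).foldl fAltStep row).length := by
  induction k generalizing c row with
  | zero =>
    rw [PySem.List.pyRange_one_eq_nil (by omega)]
    simp only [List.foldl_nil, Nat.cast_zero, add_zero]
    exact ⟨h, le_refl _⟩
  | succ k ih =>
    have hcast : ((k + 1 : Nat) : Int) = (k : Int) + 1 := by push_cast; ring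
    rw [hcast]
    rw [PySem.List.pyRange_one_cons (by omega : c + 1 < c + 1 + ((k:Int) + 1))]
    rw [List.foldl_cons]
    have hstep : RowInv (c + 1) (fAltStep row (c + 1)) := by
      have := inv_step (c + 1) row (by omega) (by simpa using h)
      simpa using this
    have ih' := ih (c + 1) (fAltStep row (c + 1)) (by omega) hstep
    rw [show (c + 1) + 1 + (k:Int) = c + 1 + ((k:Int) + 1) from by ring] at ih'
    rw [show (c + 1) + ((k:Int)) = c + ((k:Int) + 1) from by ring] at ih'
    exact ⟨ih'.1, le_trans (step_length row (c + 1)) ih'.2⟩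

-- ===== VERDICT (by name: the statement is the Claim_ definition above) =====
theorem f_spec : Claim_equal_f := by
  intro m cnt _ hpre
  have hm : 1 ≤ m := hpre
  unfold Spec_f f_alt
  by_cases hbig : 2 * cnt < m
  · -- B's pruning branch: A also returns 0 there
    rw [if_pos hbig]
    exact f_zero_of_big m cnt hm hbig
  · -- run the loop to budget c0 = min cnt m, then saturate
    rw [if_neg hbig]
    have hc : 1 ≤ cnt := by omega
    set c0 : Int := if cnt < m then cnt else m with hc0def
    have hc0pos : 1 ≤ c0 := by rw [hc0def]; split <;> omega
    have hc0m : c0 ≤ m := by rw [hc0def]; split <;> omega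
    have hfold := inv_fold c0.toNat 0 (List.replicate (m + 1).toNat 0) (le_refl 0)
      (inv_init 0 _ (le_refl 0))
    rw [show (0:Int) + 1 + (c0.toNat : Int) = c0 + 1 from by omega] at hfold
    rw [show (0:Int) + (c0.toNat : Int) = c0 from by omega] at hfold
    rw [show (0:Int) + 1 = 1 from by norm_num] at hfold
    set res := (PySem.List.pyRange 1 (c0 + 1) 1).foldl fAltStep
      (List.replicate (m + 1).toNat 0) with hres
    have hlen : m.toNat < res.length := by
      have := hfold.2
      rw [List.length_replicate] at this
      omega
    rw [PySem.List.pyGetD_eq_getElem _ 0 (by omega) (by omega)]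
    rw [hfold.1 m.toNat hlen]
    rw [if_neg (by omega)]
    rw [show ((m.toNat : Int)) = m from by omega]
    rw [hc0def]
    split
    · rfl
    · exact f_sat m cnt m hm (by omega) (by omega)
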